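-- pv_equiv track=rewrite | github.com/ethierlab/Article-Decoding | optim_lin.py | time_kfold_splits
-- ===== SOURCE A (Python) =====
-- from typing import Dict, Any, List, Tuple, Optional
--
-- def time_kfold_splits(n_time: int, n_splits: int) -> List[Tuple[int, int]]:
--     block = n_time // n_splits
--     splits = []
--     for k in range(n_splits):
--         v0 = k * block
--         v1 = (k + 1) * block if k < n_splits - 1 else n_time
--         splits.append((v0, v1))
--     return splits
-- ===== SOURCE B (Python) =====
-- from typing import List, Tuple
--
-- def time_kfold_splits(n_time: int, n_splits: int) -> List[Tuple[int, int]]: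
--     block = n_time // n_splits
--     # build the folds back-to-front, threading each fold's lower boundary
--     # down as the previous fold's upper boundary, then reverse
--     splits = []
--     hi = n_time
--     k = n_splits - 1
--     while k >= 0:
--         lo = k * block
--         splits.append((lo, hi))
--         hi = lo
--         k -= 1
--     splits.reverse()
--     return splits
-- ===== Notes on version B (the rewrite author's own statement) =====
-- stated objective: alternative
-- what changed: B builds the folds back-to-front, peeling the last fold first and threading each fold's lower boundary down as the previous fold's upper boundary (then reversing), so the upper end is a carried accumulator instead of A's per-iteration last-split conditional over a forward range loop.
import Mathlib
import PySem

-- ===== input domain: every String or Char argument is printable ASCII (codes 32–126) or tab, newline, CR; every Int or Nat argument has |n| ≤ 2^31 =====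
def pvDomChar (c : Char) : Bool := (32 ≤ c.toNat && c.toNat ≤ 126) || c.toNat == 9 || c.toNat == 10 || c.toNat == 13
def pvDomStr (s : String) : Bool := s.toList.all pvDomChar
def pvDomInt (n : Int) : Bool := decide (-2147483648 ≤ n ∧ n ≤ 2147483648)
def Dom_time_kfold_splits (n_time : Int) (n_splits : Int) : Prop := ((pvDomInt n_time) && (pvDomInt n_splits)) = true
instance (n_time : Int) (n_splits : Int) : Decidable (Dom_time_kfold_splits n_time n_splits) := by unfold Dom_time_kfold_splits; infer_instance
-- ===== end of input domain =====

-- B builds the folds recursively back-to-front, threading each fold's lower boundary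
-- down as the previous fold's upper boundary (no last-split conditional); objective: alternative.


-- ===== PORT A =====
def time_kfold_splits (n_time : Int) (n_splits : Int) : List (Int × Int) :=
  let block := PySem.Int.floordiv n_time n_splits
  (PySem.List.pyRange 0 n_splits 1).foldl
    (fun splits k =>
      let v0 := k * block
      let v1 := if k < n_splits - 1 then (k + 1) * block else n_time
      splits ++ [(v0, v1)]) []

-- ===== PORT B =====
-- B's while loop: folds built back-to-front, carrying hi down, then reversed.
def tkLoop (block : Int) (k : Int) (hi : Int) (splits : List (Int × Int)) : List (Int × Int) :=
  if _h : k ≥ 0 then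
    let lo := k * block
    tkLoop block (k - 1) lo (splits ++ [(lo, hi)])
  else splits
termination_by (k + 1).toNat
decreasing_by omega

def time_kfold_splits_alt (n_time : Int) (n_splits : Int) : List (Int × Int) :=
  let block := PySem.Int.floordiv n_time n_splits
  (tkLoop block (n_splits - 1) n_time []).reverse

-- ===== PRECONDITION & SPEC =====
-- Pre_ excludes exactly n_splits = 0, where Python A raises ZeroDivisionError.
def Pre_time_kfold_splits (n_time : Int) (n_splits : Int) : Prop := n_splits ≠ 0
instance (n_time : Int) (n_splits : Int) : Decidable (Pre_time_kfold_splits n_time n_splits) := by unfold Pre_time_kfold_splits; infer_instance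
def pvWitness_time_kfold_splits : Int × Int := (10, 3)

def Spec_time_kfold_splits (n_time : Int) (n_splits : Int) (out : List (Int × Int)) : Prop := out = time_kfold_splits_alt n_time n_splits
instance (n_time : Int) (n_splits : Int) (out : List (Int × Int)) : Decidable (Spec_time_kfold_splits n_time n_splits out) := by unfold Spec_time_kfold_splits; infer_instance

-- ===== CLAIM (what is proved, stated in full; the proofs are below) =====
def Claim_equal_time_kfold_splits : Prop := ∀ (n_time : Int) (n_splits : Int), Dom_time_kfold_splits n_time n_splits → Pre_time_kfold_splits n_time n_splits → Spec_time_kfold_splits n_time n_splits (time_kfold_splits n_time n_splits)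

-- ===== LEMMAS AND PROOFS =====

-- proof-side ghost: the list B's loop accumulates, in appended (reversed) order.
def tkBuild (block : Int) (k : Int) (hi : Int) : List (Int × Int) :=
  if _h : k < 0 then []
  else tkBuild block (k - 1) (k * block) ++ [(k * block, hi)]
termination_by (k + 1).toNat
decreasing_by omega

-- B's loop appends exactly the reverse of tkBuild onto its accumulator.
lemma tkLoop_eq (block : Int) :
    ∀ (m : Nat) (k : Int), k + 1 ≤ (m : Int) → ∀ (hi : Int) (acc : List (Int × Int)),
      tkLoop block k hi acc = acc ++ (tkBuild block k hi).reverse := by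
  intro m
  induction m with
  | zero =>
    intro k hk hi acc
    rw [tkLoop, tkBuild, dif_neg (by omega : ¬ k ≥ 0), dif_pos (by omega : k < 0)]
    simp
  | succ m ih =>
    intro k hk hi acc
    rw [tkLoop, tkBuild]
    by_cases h : k ≥ 0
    · rw [dif_pos h, dif_neg (by omega : ¬ k < 0),
        ih (k - 1) (by omega) (k * block) (acc ++ [(k * block, hi)])]
      simp
    · rw [dif_neg h, dif_pos (by omega : k < 0)]
      simp

-- A's append-loop is a map over the range.
lemma foldl_append_map {α : Type} (f : Int → α) :
    ∀ (l : List Int) (init : List α),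
      l.foldl (fun s k => s ++ [f k]) init = init ++ l.map f := by
  intro l
  induction l with
  | nil => simp
  | cons x t ih => intro init; simp [List.foldl, ih]

-- B's back-to-front recursion produces exactly A's per-index pairs for folds 0..m-1,
-- when called with the boundary A would assign to fold m-1.
lemma tkBuild_eq (n_time n_splits block : Int) :
    ∀ (m : Nat), (m : Int) ≤ n_splits →
      tkBuild block ((m : Int) - 1)
          (if (m : Int) = n_splits then n_time else (m : Int) * block)
      = (PySem.List.pyRange 0 (m : Int) 1).map
          (fun k => (k * block, if k < n_splits - 1 then (k + 1) * block else n_time)) := by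
  intro m
  induction m with
  | zero =>
    intro _
    rw [tkBuild, PySem.List.pyRange_one_eq_nil (by omega)]
    simp
  | succ m ih =>
    intro hle
    rw [tkBuild]
    have h1 : ¬ ((m : Int) + 1 - 1 < 0) := by omega
    have h2 : (m : Int) ≤ n_splits := by push_cast at hle ⊢; omega
    have h3 : ¬ ((m : Int) = n_splits) := by push_cast at hle; omega
    have ih' := ih h2
    rw [if_neg h3] at ih'
    push_cast
    simp only [add_sub_cancel_right] at *
    rw [dif_neg h1, ih',
      PySem.List.pyRange_one_succ_right (by omega : (0:Int) ≤ (m : Int))]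
    simp only [List.map_append, List.map_cons, List.map_nil, List.append_cancel_left_eq,
      List.cons.injEq, Prod.mk.injEq]
    refine ⟨⟨trivial, ?_⟩, trivial⟩
    by_cases hlt : (m : Int) < n_splits - 1
    · rw [if_pos hlt, if_neg (by omega : ¬ ((m : Int) + 1 = n_splits))]
    · rw [if_neg hlt, if_pos (by push_cast at hle; omega : (m : Int) + 1 = n_splits)]

-- ===== VERDICT (by name: the statement is the Claim_ definition above) =====
theorem time_kfold_splits_spec : Claim_equal_time_kfold_splits := by
  intro n_time n_splits _ hpre
  unfold Spec_time_kfold_splits time_kfold_splits time_kfold_splits_alt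
  rw [foldl_append_map, List.nil_append]
  show _ = (tkLoop (PySem.Int.floordiv n_time n_splits) (n_splits - 1) n_time []).reverse
  rw [tkLoop_eq (PySem.Int.floordiv n_time n_splits) n_splits.toNat (n_splits - 1) (by omega),
    List.nil_append, List.reverse_reverse]
  by_cases h : 0 < n_splits
  · have hm := tkBuild_eq n_time n_splits (PySem.Int.floordiv n_time n_splits) n_splits.toNat
      (by omega)
    rw [if_pos (by omega)] at hm
    rw [show ((n_splits.toNat : Int)) = n_splits by omega] at hm
    rw [hm]
  · rw [PySem.List.pyRange_one_eq_nil (by omega), tkBuild, dif_pos (by omega)]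
    simp
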